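-- pv_equiv track=rewrite | github.com/jamesaud/Algorithems | When_it_rains.py | calculateIndexDictionary
-- ===== SOURCE A (Python) =====
-- def calculateIndexDictionary(index_list):
--     index_paths = {}
--     #Set initial index "peak" paths. The last index could link to itself, a side effect. Still computers to an area of 0
--     min, max = index_list[0][0], index_list[0][-1]
--     index_paths[min] = max
--
--     for indexes in index_list:
--         low, high = indexes[0], indexes[-1]
--         #Only set a peak path if it is not already encapsulated by a larger peak path
--         if low < min:
--             index_paths[low] = min
--             min = low
--         if high > max:
--             index_paths[max] = high
--             max = high
--     return index_paths
-- ===== SOURCE B (Python) =====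
-- def calculateIndexDictionary(index_list):
--     # Two-phase: precompute prefix-min of lows / prefix-max of highs, then
--     # record a path entry at every strict transition of either table.
--     pmin = []
--     pmax = []
--     for iv in index_list:
--         pmin.append(iv[0] if not pmin or iv[0] < pmin[-1] else pmin[-1])
--         pmax.append(iv[-1] if not pmax or iv[-1] > pmax[-1] else pmax[-1])
--     paths = {pmin[0]: pmax[0]}
--     for m0, m1, M0, M1 in zip(pmin, pmin[1:], pmax, pmax[1:]):
--         if m1 < m0:
--             paths[m1] = m0
--         if M1 > M0:
--             paths[M0] = M1
--     return paths
-- ===== Notes on version B (the rewrite author's own statement) =====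
-- stated objective: alternative
-- what changed: B replaces A's single stateful scan (running min/max mutated inside the dict-building loop) by a two-phase decomposition: first build the prefix-minimum table of the lows and the prefix-maximum table of the highs, then walk consecutive pairs of those tables and record a dict entry at every strict transition.
import Mathlib
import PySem

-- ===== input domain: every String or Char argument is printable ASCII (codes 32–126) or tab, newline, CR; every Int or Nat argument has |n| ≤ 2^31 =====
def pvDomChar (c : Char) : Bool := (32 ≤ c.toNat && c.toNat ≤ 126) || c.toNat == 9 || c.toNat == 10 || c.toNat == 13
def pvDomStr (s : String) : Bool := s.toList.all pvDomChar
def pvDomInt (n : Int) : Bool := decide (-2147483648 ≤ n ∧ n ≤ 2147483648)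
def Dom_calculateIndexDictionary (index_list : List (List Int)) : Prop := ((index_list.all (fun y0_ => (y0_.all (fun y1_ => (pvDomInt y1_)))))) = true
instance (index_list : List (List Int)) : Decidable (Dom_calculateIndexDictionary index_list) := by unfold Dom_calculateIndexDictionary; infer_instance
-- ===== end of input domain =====

-- B rebuilds A's peak-path dict from precomputed prefix-min/prefix-max tables
-- instead of A's single stateful scan (objective: alternative decomposition, same cost).

-- iv[0] and iv[-1]; pyGetD is exact here because Pre_ excludes empty sublists,
-- where Python's iv[0]/iv[-1] raise IndexError.
def pvLow (iv : List Int) : Int := PySem.List.pyGetD iv 0 0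
def pvHigh (iv : List Int) : Int := PySem.List.pyGetD iv (-1) 0

-- ===== PORT A =====
-- A's loop body: state (index_paths, min, max)
def pvStepA (st : PySem.Dict Int Int × Int × Int) (indexes : List Int) :
    PySem.Dict Int Int × Int × Int :=
  let low := pvLow indexes
  let high := pvHigh indexes
  let st := if low < st.2.1 then (st.1.insert low st.2.1, low, st.2.2) else st
  if high > st.2.2 then (st.1.insert st.2.2 high, st.2.1, high) else st

def calculateIndexDictionary (index_list : List (List Int)) : List (Int × Int) :=
  let first := PySem.List.pyGetD index_list 0 []            -- index_list[0]; Pre_ excludes []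
  let mn := pvLow first
  let mx := pvHigh first
  let st := index_list.foldl pvStepA ((PySem.Dict.empty).insert mn mx, mn, mx)
  st.1.items

-- ===== PORT B =====
-- Source B phase-1 loop body: append the new prefix-min (resp. prefix-max) entry
def pvMinStep (acc : List Int) (iv : List Int) : List Int :=
  acc ++ [match acc.getLast? with
          | some m => if pvLow iv < m then pvLow iv else m
          | none => pvLow iv]

def pvMaxStep (acc : List Int) (iv : List Int) : List Int :=
  acc ++ [match acc.getLast? with
          | some m => if pvHigh iv > m then pvHigh iv else m
          | none => pvHigh iv]

-- Source B phase-2 loop body: record a dict entry at each strict transition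
def pvStepB (d : PySem.Dict Int Int) (q : (Int × Int) × (Int × Int)) : PySem.Dict Int Int :=
  let d := if q.1.2 < q.1.1 then d.insert q.1.2 q.1.1 else d
  if q.2.2 > q.2.1 then d.insert q.2.1 q.2.2 else d

def calculateIndexDictionary_alt (index_list : List (List Int)) : List (Int × Int) :=
  let pp := index_list.foldl (fun pp iv => (pvMinStep pp.1 iv, pvMaxStep pp.2 iv)) ([], [])
  let pmin := pp.1
  let pmax := pp.2
  let d0 : PySem.Dict Int Int :=
    (PySem.Dict.empty).insert (PySem.List.pyGetD pmin 0 0) (PySem.List.pyGetD pmax 0 0)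
  -- zip(pmin, pmin[1:], pmax, pmax[1:])
  let paths := ((pmin.zip (PySem.List.slice pmin (some 1) none)).zip
                (pmax.zip (PySem.List.slice pmax (some 1) none))).foldl pvStepB d0
  paths.items

-- ===== PRECONDITION & SPEC =====
-- Pre_ excludes exactly the inputs where Python A raises IndexError:
-- an empty index_list (index_list[0]) or any empty sublist (indexes[0]/indexes[-1]).
def Pre_calculateIndexDictionary (index_list : List (List Int)) : Prop :=
  index_list ≠ [] ∧ ∀ iv ∈ index_list, iv ≠ []
instance (index_list : List (List Int)) : Decidable (Pre_calculateIndexDictionary index_list) := by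
  unfold Pre_calculateIndexDictionary; infer_instance
def pvWitness_calculateIndexDictionary : List (List Int) := [[3, 7], [1, 5], [2, 9]]
def Spec_calculateIndexDictionary (index_list : List (List Int)) (out : List (Int × Int)) : Prop := out = calculateIndexDictionary_alt index_list
instance (index_list : List (List Int)) (out : List (Int × Int)) : Decidable (Spec_calculateIndexDictionary index_list out) := by unfold Spec_calculateIndexDictionary; infer_instance

-- ===== CLAIM (what is proved, stated in full; the proofs are below) =====
def Claim_equal_calculateIndexDictionary : Prop := ∀ (index_list : List (List Int)), Dom_calculateIndexDictionary index_list → Pre_calculateIndexDictionary index_list → Spec_calculateIndexDictionary index_list (calculateIndexDictionary index_list)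

-- ===== LEMMAS AND PROOFS =====

-- recursive characterisation of B's prefix-min / prefix-max tables
def pvScanMin (m : Int) : List (List Int) → List Int
  | [] => []
  | iv :: t =>
    let m' := if pvLow iv < m then pvLow iv else m
    m' :: pvScanMin m' t

def pvScanMax (m : Int) : List (List Int) → List Int
  | [] => []
  | iv :: t =>
    let m' := if pvHigh iv > m then pvHigh iv else m
    m' :: pvScanMax m' t

lemma pvFoldMin (l : List (List Int)) :
    ∀ (acc : List Int) (m : Int), acc.getLast? = some m →
    l.foldl pvMinStep acc = acc ++ pvScanMin m l := by
  induction l with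
  | nil => intro acc m _; simp [pvScanMin]
  | cons iv t ih =>
    intro acc m h
    simp only [List.foldl_cons, pvScanMin]
    rw [show pvMinStep acc iv = acc ++ [if pvLow iv < m then pvLow iv else m] by
          simp [pvMinStep, h]]
    rw [ih (acc ++ [if pvLow iv < m then pvLow iv else m])
        (if pvLow iv < m then pvLow iv else m) (by simp)]
    simp

lemma pvFoldMax (l : List (List Int)) :
    ∀ (acc : List Int) (m : Int), acc.getLast? = some m →
    l.foldl pvMaxStep acc = acc ++ pvScanMax m l := by
  induction l with
  | nil => intro acc m _; simp [pvScanMax]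
  | cons iv t ih =>
    intro acc m h
    simp only [List.foldl_cons, pvScanMax]
    rw [show pvMaxStep acc iv = acc ++ [if pvHigh iv > m then pvHigh iv else m] by
          simp [pvMaxStep, h]]
    rw [ih (acc ++ [if pvHigh iv > m then pvHigh iv else m])
        (if pvHigh iv > m then pvHigh iv else m) (by simp)]
    simp

-- one step of A equals one transition step of B, with matching new extremes
lemma pvStepAgree (d : PySem.Dict Int Int) (mn mx : Int) (iv : List Int) :
    pvStepA (d, mn, mx) iv =
      (pvStepB d ((mn, if pvLow iv < mn then pvLow iv else mn),
                  (mx, if pvHigh iv > mx then pvHigh iv else mx)),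
       (if pvLow iv < mn then pvLow iv else mn),
       (if pvHigh iv > mx then pvHigh iv else mx)) := by
  simp only [pvStepA, pvStepB]
  by_cases hl : pvLow iv < mn <;> by_cases hh : pvHigh iv > mx <;> simp [hl, hh]

-- the crux: A's remaining scan from state (d, mn, mx) builds the same dict as
-- B's transition fold over the corresponding suffix of the prefix tables
lemma pvMain (rest : List (List Int)) :
    ∀ (d : PySem.Dict Int Int) (mn mx : Int),
    (rest.foldl pvStepA (d, mn, mx)).1 =
    (((mn :: pvScanMin mn rest).zip (pvScanMin mn rest)).zip
      ((mx :: pvScanMax mx rest).zip (pvScanMax mx rest))).foldl pvStepB d := by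
  induction rest with
  | nil => intro d mn mx; simp [pvScanMin, pvScanMax]
  | cons iv t ih =>
    intro d mn mx
    simp only [pvScanMin, pvScanMax, List.foldl_cons, List.zip_cons_cons]
    rw [pvStepAgree]
    exact ih _ _ _

theorem calculateIndexDictionary_spec_aux (f : List Int) (rest : List (List Int)) :
    calculateIndexDictionary (f :: rest) = calculateIndexDictionary_alt (f :: rest) := by
  simp only [calculateIndexDictionary, calculateIndexDictionary_alt,
    PySem.List.pyGetD_zero_cons, PySem.List.foldl_prod_mk]
  rw [show (f :: rest).foldl pvMinStep [] = [pvLow f] ++ pvScanMin (pvLow f) rest by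
        rw [List.foldl_cons, show pvMinStep [] f = [pvLow f] from rfl]
        exact pvFoldMin rest [pvLow f] (pvLow f) (by simp),
      show (f :: rest).foldl pvMaxStep [] = [pvHigh f] ++ pvScanMax (pvHigh f) rest by
        rw [List.foldl_cons, show pvMaxStep [] f = [pvHigh f] from rfl]
        exact pvFoldMax rest [pvHigh f] (pvHigh f) (by simp)]
  simp only [List.singleton_append, PySem.List.pyGetD_zero_cons, PySem.List.slice_from_one,
    List.tail_cons, List.foldl_cons]
  rw [show pvStepA ((PySem.Dict.empty).insert (pvLow f) (pvHigh f), pvLow f, pvHigh f) f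
        = ((PySem.Dict.empty).insert (pvLow f) (pvHigh f), pvLow f, pvHigh f) by
        simp [pvStepA]]
  rw [pvMain]

-- ===== VERDICT (by name: the statement is the Claim_ definition above) =====
theorem calculateIndexDictionary_spec : Claim_equal_calculateIndexDictionary := by
  intro index_list _ hpre
  unfold Spec_calculateIndexDictionary
  cases index_list with
  | nil => exact absurd rfl hpre.1
  | cons f rest => exact calculateIndexDictionary_spec_aux f rest
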